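-- pv_equiv track=rewrite | github.com/K1ara1/prg-basics | 04-Functions/7-19.py | f
-- ===== SOURCE A (Python) =====
-- def f(number):
--
--     str_num = str(number)
--     digit_count = {}
--
--     for digit in str_num:
--         if digit.isdigit():
--             if digit in digit_count:
--                 digit_count[digit] += 1
--             else:
--                 digit_count[digit] = 1
--
--     total_sum = 0
--     for digit, count in digit_count.items():
--         if count > 1:
--             total_sum += int(digit) * count
--
--     return total_sum
-- ===== SOURCE B (Python) =====
-- def _scan(ds):
--     # ds is sorted, so equal digits are consecutive: peel off one run per call
--     if not ds:
--         return 0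
--     d = ds[0]
--     rest = ds[1:]
--     run = 1
--     while rest and rest[0] == d:
--         run += 1
--         rest = rest[1:]
--     contrib = int(d) * run if run > 1 else 0
--     return contrib + _scan(rest)
--
--
-- def f(number):
--     return _scan(sorted(c for c in str(number) if c.isdigit()))
-- ===== Notes on version B (the rewrite author's own statement) =====
-- stated objective: alternative
-- what changed: Replaces A's dict tally plus items() pass by sort-then-run-scan: the digit characters of str(number) are sorted and a recursive scan over consecutive runs of equal digits adds int(d)*run for each run longer than 1.
import Mathlib
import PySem

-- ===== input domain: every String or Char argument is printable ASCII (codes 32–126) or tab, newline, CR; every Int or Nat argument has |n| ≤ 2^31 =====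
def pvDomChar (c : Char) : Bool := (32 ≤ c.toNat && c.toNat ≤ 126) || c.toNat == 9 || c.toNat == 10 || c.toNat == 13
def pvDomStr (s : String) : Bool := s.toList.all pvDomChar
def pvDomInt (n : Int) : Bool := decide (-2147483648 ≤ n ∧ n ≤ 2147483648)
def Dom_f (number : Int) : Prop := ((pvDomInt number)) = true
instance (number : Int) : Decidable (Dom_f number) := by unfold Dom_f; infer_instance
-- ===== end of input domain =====

-- B replaces A's hash tally and items() pass by sort-then-run-scan: sort the digit characters
-- and recursively peel consecutive runs of equal digits; no speed claim (alternative algorithm).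

-- ===== PORT A =====
def f (number : Int) : Int :=
  let strNum := PySem.Int.toChars number
  let digitCount : PySem.Dict Char Int :=
    strNum.foldl (fun d digit =>
      if PySem.Chars.isdigit digit then
        if d.contains digit then d.insert digit (d.getD digit 0 + 1)
        else d.insert digit 1
      else d) PySem.Dict.empty
  -- int(digit): digit satisfies isdigit, so ofChars? is always some here
  digitCount.items.foldl (fun total p =>
    if p.2 > 1 then total + (PySem.Int.ofChars? [p.1]).getD 0 * p.2 else total) 0

-- ===== PORT B =====
-- _scan: the inner while loop counting the run of ds[0] is the span (takeWhile/dropWhile)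
-- of (· == d) on the tail, exact step for step.
def pvScan : List Char → Int
  | [] => 0
  | d :: t =>
    let run : Int := 1 + (t.takeWhile (fun c => c == d)).length
    let rest := t.dropWhile (fun c => c == d)
    (if run > 1 then (PySem.Int.ofChars? [d]).getD 0 * run else 0) + pvScan rest
termination_by l => l.length
decreasing_by
  have := List.length_dropWhile_le (fun c => c == d) t
  simp only [List.length_cons]
  omega

def f_alt (number : Int) : Int :=
  pvScan (PySem.List.sorted ((PySem.Int.toChars number).filter PySem.Chars.isdigit)
    (fun c => c) false)

-- ===== PRECONDITION & SPEC =====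
def Spec_f (number : Int) (out : Int) : Prop := out = f_alt number
instance (number : Int) (out : Int) : Decidable (Spec_f number out) := by unfold Spec_f; infer_instance

-- ===== CLAIM =====
def Claim_equal_f : Prop := ∀ (number : Int), Dom_f number → Spec_f number (f number)

-- ===== LEMMAS AND PROOFS =====

-- the per-digit contribution both programs add up: count-weighted digit value when repeated
def pvTerm (ds : List Char) (k : Char) : Int :=
  if ((ds.count k : Int) > 1) then (PySem.Int.ofChars? [k]).getD 0 * (ds.count k : Int) else 0

-- A's tally loop is Counter(filter(isdigit, s))
theorem pvBuildEqCounter (s : List Char) :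
    s.foldl (fun d digit =>
      if PySem.Chars.isdigit digit then
        if d.contains digit then d.insert digit (d.getD digit 0 + 1)
        else d.insert digit 1
      else d) PySem.Dict.empty
    = PySem.Dict.counter (s.filter PySem.Chars.isdigit) := by
  have h2 : s.foldl (fun d digit =>
      if PySem.Chars.isdigit digit then d.insert digit (d.getD digit 0 + 1)
      else d) PySem.Dict.empty
      = PySem.Dict.counter (s.filter PySem.Chars.isdigit) := by
    rw [PySem.List.foldl_if_eq_foldl_filter,
        PySem.Dict.foldl_insert_getD_add_one_eq_counter]
  refine Eq.trans ?_ h2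
  apply PySem.List.foldl_congr_mem
  intro d digit _
  by_cases hd : d.contains digit
  · simp [hd]
  · have h0 : d.getD digit 0 = 0 :=
      PySem.Dict.getD_of_not_contains d 0 (by simpa using hd)
    simp [hd, h0]

-- A's items() fold is the sum of pvTerm over the distinct digits
theorem pvFoldTerm (l : List Char) (ds : List Char) :
    l.foldl (fun total k =>
      if ((ds.count k : Int) > 1) then total + (PySem.Int.ofChars? [k]).getD 0 * (ds.count k : Int)
      else total) 0
    = (l.map (pvTerm ds)).sum := by
  have h : l.foldl (fun total k =>
      if ((ds.count k : Int) > 1) then total + (PySem.Int.ofChars? [k]).getD 0 * (ds.count k : Int)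
      else total) 0
      = l.foldl (fun total k => total + pvTerm ds k) 0 := by
    apply PySem.List.foldl_congr_mem
    intro total k _
    unfold pvTerm
    split_ifs <;> simp
  rw [h, PySem.List.foldl_add]
  simp

-- in a non-decreasing list headed by d, dropping the leading run of d's drops ALL the d's
theorem pvNotMemRest (d : Char) (t : List Char) (h : (d :: t).Pairwise (· ≤ ·)) :
    d ∉ t.dropWhile (fun c => c == d) := by
  induction t with
  | nil => simp
  | cons c t' ih =>
    by_cases hc : c = d
    · subst hc
      simp only [List.dropWhile_cons, beq_self_eq_true]
      apply ih
      have h1 := (List.pairwise_cons.mp h).2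
      have h0 := (List.pairwise_cons.mp h).1
      exact List.pairwise_cons.mpr ⟨fun x hx => h0 x (by simp [hx]), (List.pairwise_cons.mp h1).2⟩
    · have hbeq : (c == d) = false := beq_eq_false_iff_ne.mpr hc
      simp only [List.dropWhile_cons, hbeq, Bool.false_eq_true, if_false]
      intro hmem
      have hdc : d ≤ c := (List.pairwise_cons.mp h).1 c (by simp)
      have hlt : d < c := lt_of_le_of_ne hdc (fun e => hc e.symm)
      rcases List.mem_cons.mp hmem with he | hmem'
      · exact hc he.symm
      · have h1 := (List.pairwise_cons.mp h).2
        have := (List.pairwise_cons.mp h1).1 d hmem'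
        exact absurd this (not_le.mpr hlt)

-- sums of pvTerm over distinct elements only depend on the multiset
theorem pvSumPerm (l l' : List Char) (hp : l.Perm l') :
    ((PySem.Set.ofList l).map (pvTerm l)).sum = ((PySem.Set.ofList l').map (pvTerm l')).sum := by
  have hterm : pvTerm l = pvTerm l' := by
    funext k; unfold pvTerm; rw [hp.count_eq]
  have hsetperm : (PySem.Set.ofList l).Perm (PySem.Set.ofList l') := by
    refine (List.perm_ext_iff_of_nodup (PySem.Set.nodup_ofList l) (PySem.Set.nodup_ofList l')).mpr ?_
    intro a
    rw [PySem.Set.mem_ofList, PySem.Set.mem_ofList]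
    exact ⟨fun h => hp.mem_iff.mp h, fun h => hp.mem_iff.mpr h⟩
  rw [hterm, (hsetperm.map (pvTerm l')).sum_eq]

-- the run scan over a sorted list computes the sum of pvTerm over its distinct elements
theorem pvScanSorted (l : List Char) (h : l.Pairwise (· ≤ ·)) :
    pvScan l = ((PySem.Set.ofList l).map (pvTerm l)).sum := by
  induction l using pvScan.induct with
  | case1 => simp [pvScan, PySem.Set.ofList]
  | case2 d t rest ih =>
    rw [pvScan]
    set take := t.takeWhile (fun c => c == d) with htake
    have hsplit : take ++ rest = t := List.takeWhile_append_dropWhile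
    have htaked : ∀ c ∈ take, c = d := by
      intro c hc
      have := List.mem_takeWhile_imp hc
      simpa using this
    have hdnot : d ∉ rest := pvNotMemRest d t h
    have hrest_sub : rest.Sublist t := List.dropWhile_sublist _
    have hrest_pw : rest.Pairwise (· ≤ ·) :=
      List.Pairwise.sublist hrest_sub (List.pairwise_cons.mp h).2
    -- counts
    have hcount_d : (((d :: t).count d : Int)) = 1 + (take.length : Int) := by
      have h1 : take.count d = take.length := List.count_eq_length.mpr (by
        intro a ha; exact (htaked a ha) ▸ rfl)
      have h2 : rest.count d = 0 := List.count_eq_zero.mpr hdnot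
      have h3 : t.count d = take.length := by
        rw [← hsplit, List.count_append, h1, h2]; omega
      have h4 : (d :: t).count d = take.length + 1 := by
        simp [h3]
      rw [h4]; push_cast; ring
    have hcount_ne : ∀ k, k ≠ d → (d :: t).count k = rest.count k := by
      intro k hk
      have h1 : take.count k = 0 := List.count_eq_zero.mpr (by
        intro hmem; exact hk (htaked k hmem))
      have h5 : (d :: t).count k = t.count k := by
        simp [Ne.symm hk]
      rw [h5, ← hsplit, List.count_append, h1]
      omega
    -- contribution of the run = pvTerm (d::t) d
    have hcontrib : (if 1 + (take.length : Int) > 1 then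
          (PySem.Int.ofChars? [d]).getD 0 * (1 + (take.length : Int)) else 0)
        = pvTerm (d :: t) d := by
      unfold pvTerm
      rw [← hcount_d]
    -- distinct elements of d::t = d :: distinct elements of rest
    have hset : (PySem.Set.ofList (d :: t)).Perm (d :: PySem.Set.ofList rest) := by
      refine (List.perm_ext_iff_of_nodup (PySem.Set.nodup_ofList _) ?_).mpr ?_
      · exact List.nodup_cons.mpr ⟨fun hc => hdnot ((PySem.Set.mem_ofList _ _).mp hc),
          PySem.Set.nodup_ofList rest⟩
      · intro a
        rw [PySem.Set.mem_ofList]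
        simp only [List.mem_cons, PySem.Set.mem_ofList]
        constructor
        · rintro (rfl | hat)
          · exact Or.inl rfl
          · rw [← hsplit] at hat
            rcases List.mem_append.mp hat with h1 | h2
            · exact Or.inl (htaked a h1)
            · exact Or.inr h2
        · rintro (rfl | har)
          · exact Or.inl rfl
          · exact Or.inr (hrest_sub.mem har)
    have hsum : ((PySem.Set.ofList (d :: t)).map (pvTerm (d :: t))).sum
        = pvTerm (d :: t) d + ((PySem.Set.ofList rest).map (pvTerm (d :: t))).sum := by
      rw [(hset.map (pvTerm (d :: t))).sum_eq]
      simp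
    have hmapeq : (PySem.Set.ofList rest).map (pvTerm (d :: t))
        = (PySem.Set.ofList rest).map (pvTerm rest) := by
      apply List.map_congr_left
      intro k hk
      have hkrest : k ∈ rest := (PySem.Set.mem_ofList _ _).mp hk
      have hkd : k ≠ d := fun e => hdnot (e ▸ hkrest)
      unfold pvTerm
      rw [hcount_ne k hkd]
    rw [hsum, hmapeq, ← ih hrest_pw, hcontrib]

theorem f_spec_aux (number : Int) : f number = f_alt number := by
  unfold f f_alt
  dsimp only
  set s := PySem.Int.toChars number with hs
  set ds := s.filter PySem.Chars.isdigit with hds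
  rw [pvBuildEqCounter, PySem.Dict.items_counter, List.foldl_map,
      pvFoldTerm (PySem.Set.ofList ds) ds]
  set sds := PySem.List.sorted ds (fun c => c) false with hsds
  have hpw : sds.Pairwise (· ≤ ·) := by
    have := PySem.List.sorted_pairwise ds (fun c => c)
    simpa using this
  rw [pvScanSorted sds hpw]
  exact pvSumPerm ds sds (PySem.List.sorted_perm ds (fun c => c) false).symm

-- ===== VERDICT =====
theorem f_spec : Claim_equal_f := by
  intro number _
  unfold Spec_f
  exact f_spec_aux number
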